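-- pv_equiv track=rewrite | github.com/abhishek25dh/exp-pipeline | layout_1_step_2.py | split_segments_into_spans
-- ===== SOURCE A (Python) =====
-- def segment_sizes(length: int, slots: int):
--     if slots <= 0:
--         return []
--     base = length // slots
--     rem = length % slots
--     out = []
--     for i in range(slots):
--         out.append(base + (1 if i < rem else 0))
--     return out
--
-- def split_segments_into_spans(segments, slots_per_segment):
--     spans = []
--     for idx, (start, end) in enumerate(segments):
--         slots = slots_per_segment[idx]
--         if slots <= 0:
--             continue
--         sizes = segment_sizes(end - start, slots)
--         cur = start
--         for size in sizes:
--             nxt = cur + size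
--             spans.append([cur, nxt])
--             cur = nxt
--     return spans
-- ===== SOURCE B (Python) =====
-- def split_segments_into_spans(segments, slots_per_segment):
--     return [
--         [start + i * base + min(i, rem), start + (i + 1) * base + min(i + 1, rem)]
--         for (start, end), slots in zip(segments, slots_per_segment)
--         if slots > 0
--         for base, rem in [divmod(end - start, slots)]
--         for i in range(slots)
--     ]
-- ===== Notes on version B (the rewrite author's own statement) =====
-- stated objective: simpler
-- what changed: Replaces the segment_sizes helper and the cumulative cursor with a single flat comprehension that computes each span boundary by the closed form start + i*base + min(i, rem).
import Mathlib
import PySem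

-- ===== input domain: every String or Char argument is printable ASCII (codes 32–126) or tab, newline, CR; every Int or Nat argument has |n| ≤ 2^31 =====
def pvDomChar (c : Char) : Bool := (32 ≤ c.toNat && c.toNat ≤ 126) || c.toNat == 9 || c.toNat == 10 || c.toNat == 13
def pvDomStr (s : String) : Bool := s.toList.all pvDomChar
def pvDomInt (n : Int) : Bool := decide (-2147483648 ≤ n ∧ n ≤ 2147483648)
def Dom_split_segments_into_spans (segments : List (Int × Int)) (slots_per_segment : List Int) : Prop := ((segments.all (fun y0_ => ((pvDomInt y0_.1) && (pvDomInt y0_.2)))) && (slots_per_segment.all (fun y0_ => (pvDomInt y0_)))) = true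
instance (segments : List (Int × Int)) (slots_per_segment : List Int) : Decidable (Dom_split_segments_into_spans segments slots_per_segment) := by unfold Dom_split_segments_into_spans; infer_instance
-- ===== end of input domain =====

-- B replaces A's segment_sizes helper and threaded cursor with a flat comprehension whose
-- boundaries come from the closed form start + i*base + min(i, rem) (objective: simpler).

-- ===== PORT A =====
def segment_sizes (length slots : Int) : List Int :=
  if slots ≤ 0 then []
  else
    let base := PySem.Int.floordiv length slots
    let rem := PySem.Int.mod length slots
    (PySem.List.pyRange 0 slots 1).foldl
      (fun out i => out ++ [base + (if i < rem then 1 else 0)]) []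

def split_segments_into_spans (segments : List (Int × Int)) (slots_per_segment : List Int) : List (List Int) :=
  (PySem.List.enumerate segments 0).foldl
    (fun spans p =>
      -- slots_per_segment[idx]: IndexError when idx out of range, excluded by Pre_ (default 0 is never used there)
      let slots := PySem.List.pyGetD slots_per_segment p.1 0
      if slots ≤ 0 then spans
      else
        let sizes := segment_sizes (p.2.2 - p.2.1) slots
        (sizes.foldl
          (fun (q : List (List Int) × Int) size => (q.1 ++ [[q.2, q.2 + size]], q.2 + size))
          (spans, p.2.1)).1) []

-- ===== PORT B =====
def split_segments_into_spans_alt (segments : List (Int × Int)) (slots_per_segment : List Int) : List (List Int) :=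
  (segments.zip slots_per_segment).flatMap (fun p =>
    if p.2 > 0 then
      let base := PySem.Int.floordiv (p.1.2 - p.1.1) p.2
      let rem := PySem.Int.mod (p.1.2 - p.1.1) p.2
      (PySem.List.pyRange 0 p.2 1).map (fun i =>
        [p.1.1 + i * base + min i rem, p.1.1 + (i + 1) * base + min (i + 1) rem])
    else [])

-- ===== PRECONDITION & SPEC =====
-- A indexes slots_per_segment[idx] for every segment index, so it raises IndexError
-- unless the slot list is at least as long as the segment list.
def Pre_split_segments_into_spans (segments : List (Int × Int)) (slots_per_segment : List Int) : Prop :=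
  segments.length ≤ slots_per_segment.length
instance (segments : List (Int × Int)) (slots_per_segment : List Int) : Decidable (Pre_split_segments_into_spans segments slots_per_segment) := by unfold Pre_split_segments_into_spans; infer_instance

def pvWitness_split_segments_into_spans : (List (Int × Int)) × List Int := ([(0, 5), (10, 13)], [2, 3])

def Spec_split_segments_into_spans (segments : List (Int × Int)) (slots_per_segment : List Int) (out : List (List Int)) : Prop := out = split_segments_into_spans_alt segments slots_per_segment
instance (segments : List (Int × Int)) (slots_per_segment : List Int) (out : List (List Int)) : Decidable (Spec_split_segments_into_spans segments slots_per_segment out) := by unfold Spec_split_segments_into_spans; infer_instance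

-- ===== CLAIM (what is proved, stated in full; the proofs are below) =====
def Claim_equal_split_segments_into_spans : Prop := ∀ (segments : List (Int × Int)) (slots_per_segment : List Int), Dom_split_segments_into_spans segments slots_per_segment → Pre_split_segments_into_spans segments slots_per_segment → Spec_split_segments_into_spans segments slots_per_segment (split_segments_into_spans segments slots_per_segment)


-- ===== LEMMAS AND PROOFS =====

-- the append-only foldl of segment_sizes is a map
theorem foldl_append_map (xs : List Int) (f : Int → Int) (acc : List Int) :
    xs.foldl (fun out i => out ++ [f i]) acc = acc ++ xs.map f := by
  induction xs generalizing acc with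
  | nil => simp
  | cons x xs ih => simp [List.foldl_cons, ih]

-- A's cursor-threading fold over the sizes list produces B's closed-form spans
theorem cursor_fold (s base rem : Int) (hrem : 0 ≤ rem) (n : Nat) (acc : List (List Int)) :
    ((List.range n).map (fun k : Nat => base + (if (k : Int) < rem then 1 else 0))).foldl
        (fun (q : List (List Int) × Int) size => (q.1 ++ [[q.2, q.2 + size]], q.2 + size))
        (acc, s)
      = (acc ++ (List.range n).map (fun k : Nat =>
            [s + (k : Int) * base + min (k : Int) rem, s + ((k : Int) + 1) * base + min ((k : Int) + 1) rem]),
         s + (n : Int) * base + min (n : Int) rem) := by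
  induction n with
  | zero => simp [min_eq_left hrem]
  | succ n ih =>
    rw [List.range_succ, List.map_append, List.map_append, List.foldl_append, ih]
    simp only [List.map_cons, List.map_nil, List.foldl_cons, List.foldl_nil, List.append_assoc]
    have hb : ((n : Int) + 1) * base = (n : Int) * base + base := by ring
    have e1 : s + (n : Int) * base + min (n : Int) rem + (base + (if (n : Int) < rem then 1 else 0))
        = s + ((n : Int) + 1) * base + min ((n : Int) + 1) rem := by
      rw [hb]; split_ifs with h <;> omega
    refine Prod.ext ?_ ?_
    · push_cast
      rw [e1]
    · push_cast
      rw [e1]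

theorem outer_fold (slots_per_segment : List Int) (segs : List (Int × Int)) :
    ∀ (j : Nat) (acc : List (List Int)),
      j + segs.length ≤ slots_per_segment.length →
      (PySem.List.enumerate segs (j : Int)).foldl
        (fun spans p =>
          let slots := PySem.List.pyGetD slots_per_segment p.1 0
          if slots ≤ 0 then spans
          else
            let sizes := segment_sizes (p.2.2 - p.2.1) slots
            (sizes.foldl
              (fun (q : List (List Int) × Int) size => (q.1 ++ [[q.2, q.2 + size]], q.2 + size))
              (spans, p.2.1)).1) acc
      = acc ++ (segs.zip (slots_per_segment.drop j)).flatMap (fun p =>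
          if p.2 > 0 then
            let base := PySem.Int.floordiv (p.1.2 - p.1.1) p.2
            let rem := PySem.Int.mod (p.1.2 - p.1.1) p.2
            (PySem.List.pyRange 0 p.2 1).map (fun i =>
              [p.1.1 + i * base + min i rem, p.1.1 + (i + 1) * base + min (i + 1) rem])
          else []) := by
  induction segs with
  | nil => intro j acc _; simp [PySem.List.enumerate_nil]
  | cons hd tl ih =>
    intro j acc hlen
    have hj : j < slots_per_segment.length := by simp at hlen; omega
    rw [PySem.List.enumerate_cons, List.foldl_cons]
    have hdrop : slots_per_segment.drop j = slots_per_segment[j] :: slots_per_segment.drop (j + 1) :=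
      List.drop_eq_getElem_cons hj
    have hget : PySem.List.pyGetD slots_per_segment (j : Int) 0 = slots_per_segment[j] := by
      rw [PySem.List.pyGetD_natCast]
      exact List.getD_eq_getElem _ _ hj
    have h1 : ((j : Int) + 1) = ((j + 1 : Nat) : Int) := by push_cast; ring
    by_cases hkpos : slots_per_segment[j] ≤ 0
    · -- slots ≤ 0: A skips the segment, B's flatMap element is []
      simp only [hget, if_pos hkpos]
      rw [h1, ih (j + 1) acc (by simp at hlen ⊢; omega), hdrop]
      simp only [List.zip_cons_cons, List.flatMap_cons]
      rw [if_neg (by omega)]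
      simp
    · rw [not_le] at hkpos
      simp only [hget, if_neg (by omega : ¬ slots_per_segment[j] ≤ 0)]
      rw [h1, ih (j + 1) _ (by simp at hlen ⊢; omega), hdrop]
      simp only [List.zip_cons_cons, List.flatMap_cons]
      rw [if_pos (by omega)]
      set k := slots_per_segment[j] with hk
      set L := hd.2 - hd.1 with hL
      set base := PySem.Int.floordiv L k with hbase
      set rem := PySem.Int.mod L k with hrem0
      have hrnn : 0 ≤ rem := PySem.Int.mod_nonneg L hkpos
      have hrange : PySem.List.pyRange 0 k 1 = (List.range k.toNat).map (fun m : Nat => (m : Int)) := by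
        rw [PySem.List.pyRange_one]
        simp
      have hsizes : segment_sizes L k
          = (List.range k.toNat).map (fun m : Nat => base + (if (m : Int) < rem then 1 else 0)) := by
        rw [segment_sizes, if_neg (by omega : ¬ k ≤ 0), hrange]
        simp only [foldl_append_map, List.nil_append, List.map_map]
        rfl
      rw [hsizes, cursor_fold hd.1 base rem hrnn k.toNat acc, hrange, List.map_map]
      simp [Function.comp, List.append_assoc]

-- ===== VERDICT (by name: the statement is the Claim_ definition above) =====
theorem split_segments_into_spans_spec : Claim_equal_split_segments_into_spans := by
  intro segments slots_per_segment _ hpre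
  unfold Spec_split_segments_into_spans split_segments_into_spans split_segments_into_spans_alt
  have h := outer_fold slots_per_segment segments 0 [] (by simpa using hpre)
  simpa using h
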